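-- pv_equiv track=rewrite | github.com/MK-ek11/Implement-AdaBoost | code/A2_AdaBoost_Q2_code.py | stump_tree
-- ===== SOURCE A (Python) =====
-- def stump_tree(x_values,y_values, threshold):
--     """ Create a stump (decision tree of max depth of 1)
--         if x < v,  y_predict = 1 otherwise y_predict = -1 """
--     leftN_1 = [] # This will return the list of x correctly classified as 1
--     leftN_incorrect = [] # This will return the list of x incorrectly classified as 1
--     rightN_minus1 = [] # This will return the list of x correctly classified as -1
--     rightN_incorrect = [] # This will return the list of x incorrectly classified as -1
--     for i in range(0,len(x_values)):
--         x = x_values[i]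
--         y = y_values[i]
--         if x_values[i] < threshold: # Left Node (For 1)
--             # Collecting all the x in left node when x < v
--             if y == 1:
--                 leftN_1.append(x)
--             else:
--                 leftN_incorrect.append(x)
--         else: # Right Node (For -1)
--             # Collecting all the x in right node when otherwise
--             if y == -1:
--                 rightN_minus1.append(x)
--             else:
--                 rightN_incorrect.append(x)
--     return leftN_1, leftN_incorrect, rightN_minus1, rightN_incorrect
-- ===== SOURCE B (Python) =====
-- def stump_tree(x_values, y_values, threshold):
--     """Four independent index-based filtering passes, one per bucket."""
--     idx = range(len(x_values))
--     leftN_1 = [x_values[i] for i in idx if x_values[i] < threshold and y_values[i] == 1]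
--     leftN_incorrect = [x_values[i] for i in idx if x_values[i] < threshold and y_values[i] != 1]
--     rightN_minus1 = [x_values[i] for i in idx if x_values[i] >= threshold and y_values[i] == -1]
--     rightN_incorrect = [x_values[i] for i in idx if x_values[i] >= threshold and y_values[i] != -1]
--     return leftN_1, leftN_incorrect, rightN_minus1, rightN_incorrect
-- ===== Notes on version B (the rewrite author's own statement) =====
-- stated objective: simpler
-- what changed: Replaces the single loop with nested branches and four mutable accumulators by four independent index-based list comprehensions, one per output bucket.
import Mathlib
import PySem

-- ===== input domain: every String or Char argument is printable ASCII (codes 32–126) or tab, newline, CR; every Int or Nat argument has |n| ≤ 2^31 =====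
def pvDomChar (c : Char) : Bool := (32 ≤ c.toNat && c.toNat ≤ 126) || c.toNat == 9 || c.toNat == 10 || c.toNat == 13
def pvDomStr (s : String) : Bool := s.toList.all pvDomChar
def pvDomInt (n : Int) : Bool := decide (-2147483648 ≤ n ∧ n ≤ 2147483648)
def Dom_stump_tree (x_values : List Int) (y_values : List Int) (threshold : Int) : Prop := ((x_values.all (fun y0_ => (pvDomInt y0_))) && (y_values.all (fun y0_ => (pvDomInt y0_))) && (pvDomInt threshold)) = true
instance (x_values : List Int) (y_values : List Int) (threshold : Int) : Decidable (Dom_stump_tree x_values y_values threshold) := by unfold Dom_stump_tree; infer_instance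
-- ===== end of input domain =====

-- B replaces A's single branching loop with four independent per-bucket filtering passes (objective: simpler decomposition).


-- ===== PORT A =====
-- one loop over range(len(x_values)), nested branches, four mutable accumulators
def stump_tree (x_values : List Int) (y_values : List Int) (threshold : Int) : List Int × List Int × List Int × List Int :=
  (PySem.List.pyRange 0 x_values.length 1).foldl
    (fun (acc : List Int × List Int × List Int × List Int) i =>
      let x := PySem.List.pyGetD x_values i 0   -- x_values[i]; in range under Pre_
      let y := PySem.List.pyGetD y_values i 0   -- y_values[i]; in range under Pre_
      if x < threshold then
        if y == 1 then (acc.1 ++ [x], acc.2.1, acc.2.2.1, acc.2.2.2)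
        else (acc.1, acc.2.1 ++ [x], acc.2.2.1, acc.2.2.2)
      else
        if y == -1 then (acc.1, acc.2.1, acc.2.2.1 ++ [x], acc.2.2.2)
        else (acc.1, acc.2.1, acc.2.2.1, acc.2.2.2 ++ [x]))
    ([], [], [], [])

-- ===== PORT B =====
-- four independent index-based comprehensions, one per bucket
def stump_tree_alt (x_values : List Int) (y_values : List Int) (threshold : Int) : List Int × List Int × List Int × List Int :=
  let idx := PySem.List.pyRange 0 x_values.length 1
  let xv := fun i => PySem.List.pyGetD x_values i 0
  let yv := fun i => PySem.List.pyGetD y_values i 0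
  ((idx.filter (fun i => xv i < threshold && yv i == 1)).map xv,
   (idx.filter (fun i => xv i < threshold && !(yv i == 1))).map xv,
   (idx.filter (fun i => !(xv i < threshold) && yv i == -1)).map xv,
   (idx.filter (fun i => !(xv i < threshold) && !(yv i == -1))).map xv)

-- ===== PRECONDITION & SPEC =====
-- Both A and B raise IndexError on y_values[i] when y_values is shorter than x_values; Pre_ excludes exactly those crashes.
def Pre_stump_tree (x_values : List Int) (y_values : List Int) (threshold : Int) : Prop :=
  x_values.length ≤ y_values.length
instance (x_values : List Int) (y_values : List Int) (threshold : Int) : Decidable (Pre_stump_tree x_values y_values threshold) := by unfold Pre_stump_tree; infer_instance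
def pvWitness_stump_tree : List Int × List Int × Int := ([1, 2, 3, 4], [1, -1, 1, -1], 3)
def Spec_stump_tree (x_values : List Int) (y_values : List Int) (threshold : Int) (out : List Int × List Int × List Int × List Int) : Prop := out = stump_tree_alt x_values y_values threshold
instance (x_values : List Int) (y_values : List Int) (threshold : Int) (out : List Int × List Int × List Int × List Int) : Decidable (Spec_stump_tree x_values y_values threshold out) := by unfold Spec_stump_tree; infer_instance

-- ===== CLAIM (what is proved, stated in full; the proofs are below) =====
def Claim_equal_stump_tree : Prop := ∀ (x_values : List Int) (y_values : List Int) (threshold : Int), Dom_stump_tree x_values y_values threshold → Pre_stump_tree x_values y_values threshold → Spec_stump_tree x_values y_values threshold (stump_tree x_values y_values threshold)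

-- ===== LEMMAS AND PROOFS =====
-- Fold invariant: A's loop over any index list appends each bucket's filtered-and-mapped suffix to the accumulator.
theorem stump_fold_eq (x_values y_values : List Int) (threshold : Int) (l : List Int)
    (a b c d : List Int) :
    (l.foldl
      (fun (acc : List Int × List Int × List Int × List Int) i =>
        let x := PySem.List.pyGetD x_values i 0
        let y := PySem.List.pyGetD y_values i 0
        if x < threshold then
          if y == 1 then (acc.1 ++ [x], acc.2.1, acc.2.2.1, acc.2.2.2)
          else (acc.1, acc.2.1 ++ [x], acc.2.2.1, acc.2.2.2)
        else
          if y == -1 then (acc.1, acc.2.1, acc.2.2.1 ++ [x], acc.2.2.2)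
          else (acc.1, acc.2.1, acc.2.2.1, acc.2.2.2 ++ [x]))
      (a, b, c, d)) =
    (let xv := fun i => PySem.List.pyGetD x_values i 0
     let yv := fun i => PySem.List.pyGetD y_values i 0
     (a ++ (l.filter (fun i => xv i < threshold && yv i == 1)).map xv,
      b ++ (l.filter (fun i => xv i < threshold && !(yv i == 1))).map xv,
      c ++ (l.filter (fun i => !(xv i < threshold) && yv i == -1)).map xv,
      d ++ (l.filter (fun i => !(xv i < threshold) && !(yv i == -1))).map xv)) := by
  induction l generalizing a b c d with
  | nil => simp
  | cons i t ih =>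
    simp only [List.foldl_cons, List.filter_cons]
    by_cases hx : PySem.List.pyGetD x_values i 0 < threshold
    · by_cases hy : PySem.List.pyGetD y_values i 0 = 1
      · simp only [hx, hy]; rw [ih]; simp [hx, hy]
      · simp only [hx, hy]; rw [ih]; simp [hx, hy]
    · by_cases hy : PySem.List.pyGetD y_values i 0 = -1
      · simp only [hx, hy]; rw [ih]; simp [hx, hy]
      · simp only [hx, hy]; rw [ih]; simp [hx, hy]

-- ===== VERDICT (by name: the statement is the Claim_ definition above) =====
theorem stump_tree_spec : Claim_equal_stump_tree := by
  intro x_values y_values threshold _ _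
  unfold Spec_stump_tree stump_tree stump_tree_alt
  rw [stump_fold_eq]
  simp
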